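-- pv_equiv track=rewrite | github.com/tuimaorongrongrong2075/OpenClaw_308 | workspace/scripts/mail/clean_gmail_marketing.py | is_marketing_email
-- ===== SOURCE A (Python) =====
-- def is_marketing_email(subject, from_header):
--     """判断是否为营销类邮件"""
--     keywords = [
--         '限时', '优惠', '促销', '折扣', '秒杀', '特价',
--         'limited time', 'sale', 'discount', 'promo', 'offer', 'deal',
--         '抢购', '立减', '满减', '优惠券', '代金券',
--         '闪购', '团购', '拼团',
--         'unsubscribe', '退订', '邮件订阅', 'newsletter'
--     ]
--     subject_lower = subject.lower()
--     from_lower = from_header.lower()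
--     return any(keyword in subject_lower or keyword in from_lower for keyword in keywords)
-- ===== SOURCE B (Python) =====
-- _KEYWORDS = [
--     '限时', '优惠', '促销', '折扣', '秒杀', '特价',
--     'limited time', 'sale', 'discount', 'promo', 'offer', 'deal',
--     '抢购', '立减', '满减', '优惠券', '代金券',
--     '闪购', '团购', '拼团',
--     'unsubscribe', '退订', '邮件订阅', 'newsletter'
-- ]
--
--
-- def _scan(s):
--     # position-driven multi-pattern scan: walk the string once, at each
--     # position test whether any keyword starts there
--     for i in range(len(s)):
--         for k in _KEYWORDS:
--             if s.startswith(k, i):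
--                 return True
--     return False
--
--
-- def is_marketing_email(subject, from_header):
--     """判断是否为营销类邮件"""
--     return _scan(subject.lower()) or _scan(from_header.lower())
-- ===== Notes on version B (the rewrite author's own statement) =====
-- stated objective: alternative
-- what changed: Replaces the keyword-outer loop of whole-string substring searches ('k in subject or k in from') with a position-outer single walk over each field that tests every keyword as a prefix at each position and short-circuits on the first hit.
import Mathlib
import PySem

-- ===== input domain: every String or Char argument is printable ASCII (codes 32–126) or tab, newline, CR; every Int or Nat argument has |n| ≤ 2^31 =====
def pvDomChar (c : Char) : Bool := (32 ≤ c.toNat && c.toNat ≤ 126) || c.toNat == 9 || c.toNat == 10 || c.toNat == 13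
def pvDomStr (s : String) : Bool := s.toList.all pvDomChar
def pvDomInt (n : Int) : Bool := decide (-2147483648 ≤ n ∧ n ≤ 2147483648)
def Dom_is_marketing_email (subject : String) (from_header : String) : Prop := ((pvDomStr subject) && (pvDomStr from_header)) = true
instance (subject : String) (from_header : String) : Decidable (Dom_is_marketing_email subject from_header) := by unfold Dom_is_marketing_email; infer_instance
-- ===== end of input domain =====

-- B replaces A's keyword-outer loop of whole-string substring searches with a
-- position-outer single walk testing each keyword as a prefix at each position (alternative decomposition, same cost).

-- ===== PORT A =====
def pvKeywords : List String := [
  "限时", "优惠", "促销", "折扣", "秒杀", "特价",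
  "limited time", "sale", "discount", "promo", "offer", "deal",
  "抢购", "立减", "满减", "优惠券", "代金券",
  "闪购", "团购", "拼团",
  "unsubscribe", "退订", "邮件订阅", "newsletter"]

def is_marketing_email (subject : String) (from_header : String) : Bool :=
  let subject_lower := PySem.Str.lower subject
  let from_lower := PySem.Str.lower from_header
  pvKeywords.any (fun keyword =>
    PySem.Str.isIn keyword subject_lower || PySem.Str.isIn keyword from_lower)

-- ===== PORT B =====
def pvKeywordsAlt : List (List Char) := pvKeywords.map String.toList

-- B's _scan: walk the string once; at each position test every keyword as a prefix
def pvScan : List Char → Bool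
  | [] => false
  | c :: rest => pvKeywordsAlt.any (fun k => k.isPrefixOf (c :: rest)) || pvScan rest

def is_marketing_email_alt (subject : String) (from_header : String) : Bool :=
  pvScan (PySem.Str.lower subject).toList || pvScan (PySem.Str.lower from_header).toList

-- ===== PRECONDITION & SPEC =====
def Spec_is_marketing_email (subject : String) (from_header : String) (out : Bool) : Prop := out = is_marketing_email_alt subject from_header
instance (subject : String) (from_header : String) (out : Bool) : Decidable (Spec_is_marketing_email subject from_header out) := by unfold Spec_is_marketing_email; infer_instance

-- ===== CLAIM (what is proved, stated in full; the proofs are below) =====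
def Claim_equal_is_marketing_email : Prop := ∀ (subject : String) (from_header : String), Dom_is_marketing_email subject from_header → Spec_is_marketing_email subject from_header (is_marketing_email subject from_header)

-- ===== LEMMAS AND PROOFS =====

-- no keyword is empty, so no keyword is an infix of the empty string
lemma pvKeywordsAlt_ne_nil : ∀ k ∈ pvKeywordsAlt, k ≠ [] := by decide

lemma pvScan_iff (cs : List Char) :
    pvScan cs = true ↔ ∃ k ∈ pvKeywordsAlt, k <:+: cs := by
  induction cs with
  | nil =>
    simp only [pvScan, Bool.false_eq_true, false_iff]
    rintro ⟨k, hk, hinf⟩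
    exact pvKeywordsAlt_ne_nil k hk (List.eq_nil_of_infix_nil hinf)
  | cons c rest ih =>
    simp only [pvScan, Bool.or_eq_true, List.any_eq_true, ih]
    constructor
    · rintro (⟨k, hk, hp⟩ | ⟨k, hk, hinf⟩)
      · exact ⟨k, hk, ((List.isPrefixOf_iff_prefix).mp hp).isInfix⟩
      · exact ⟨k, hk, hinf.trans ((rest.suffix_cons c).isInfix)⟩
    · rintro ⟨k, hk, hinf⟩
      rcases List.infix_cons_iff.mp hinf with hp | hinf'
      · exact Or.inl ⟨k, hk, (List.isPrefixOf_iff_prefix).mpr hp⟩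
      · exact Or.inr ⟨k, hk, hinf'⟩

lemma pv_eq (subject from_header : String) :
    is_marketing_email subject from_header = is_marketing_email_alt subject from_header := by
  unfold is_marketing_email is_marketing_email_alt
  rw [Bool.eq_iff_iff]
  simp only [List.any_eq_true, Bool.or_eq_true, PySem.Str.isIn_iff_infix,
    pvScan_iff, pvKeywordsAlt, List.mem_map]
  constructor
  · rintro ⟨k, hk, h | h⟩
    · exact Or.inl ⟨k.toList, ⟨k, hk, rfl⟩, h⟩
    · exact Or.inr ⟨k.toList, ⟨k, hk, rfl⟩, h⟩
  · rintro (⟨_, ⟨k, hk, rfl⟩, h⟩ | ⟨_, ⟨k, hk, rfl⟩, h⟩)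
    · exact ⟨k, hk, Or.inl h⟩
    · exact ⟨k, hk, Or.inr h⟩

-- ===== VERDICT (by name: the statement is the Claim_ definition above) =====
theorem is_marketing_email_spec : Claim_equal_is_marketing_email := by
  intro subject from_header _
  exact pv_eq subject from_header
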